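-- pv_equiv track=rewrite | github.com/thainsCEB/CaptiveBreedingManagement | PopulationStructure_Identifications/fastNGSadmix/run_fastNGSadmixPCA.py | filter_samples
-- ===== SOURCE A (Python) =====
-- from typing import Dict, List, Optional, Tuple
--
-- def filter_samples(samples: List[Dict[str,str]],
--                    taxa_filter: Optional[str],
--                    pop_filter: Optional[str]) -> List[Dict[str,str]]:
--     out = samples
--     if taxa_filter:
--         keep = {t.strip() for t in taxa_filter.replace(';', ',').split(',') if t.strip()}
--         out = [s for s in out if s['taxa'] in keep]
--     if pop_filter:
--         keep = {p.strip() for p in pop_filter.replace(';', ',').split(',') if p.strip()}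
--         out = [s for s in out if s['population'] in keep]
--     return out
-- ===== SOURCE B (Python) =====
-- # B: build a data-driven pipeline of (key, keep-set) stages from whichever
-- # filters are truthy, then emit survivors in one explicit accumulator loop whose
-- # all() short-circuits exactly as A's sequential passes read the keys.
-- from typing import Dict, List, Optional
--
--
-- def filter_samples(samples: List[Dict[str, str]],
--                    taxa_filter: Optional[str],
--                    pop_filter: Optional[str]) -> List[Dict[str, str]]:
--     stages = []
--     for key, spec in (("taxa", taxa_filter), ("population", pop_filter)):
--         if spec:
--             keep = {t.strip() for t in spec.replace(';', ',').split(',') if t.strip()}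
--             stages.append((key, keep))
--     if not stages:
--         return samples
--     out = []
--     for s in samples:
--         if all(s[key] in keep for key, keep in stages):
--             out.append(s)
--     return out
-- ===== Notes on version B (the rewrite author's own statement) =====
-- stated objective: alternative
-- what changed: B replaces A's hard-coded sequential filtering passes by a data-driven pipeline: it first builds a list of (key, keep-set) stages from the truthy filters, then walks the samples once with an explicit accumulator, keeping a sample when it passes all stages.
import Mathlib
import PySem

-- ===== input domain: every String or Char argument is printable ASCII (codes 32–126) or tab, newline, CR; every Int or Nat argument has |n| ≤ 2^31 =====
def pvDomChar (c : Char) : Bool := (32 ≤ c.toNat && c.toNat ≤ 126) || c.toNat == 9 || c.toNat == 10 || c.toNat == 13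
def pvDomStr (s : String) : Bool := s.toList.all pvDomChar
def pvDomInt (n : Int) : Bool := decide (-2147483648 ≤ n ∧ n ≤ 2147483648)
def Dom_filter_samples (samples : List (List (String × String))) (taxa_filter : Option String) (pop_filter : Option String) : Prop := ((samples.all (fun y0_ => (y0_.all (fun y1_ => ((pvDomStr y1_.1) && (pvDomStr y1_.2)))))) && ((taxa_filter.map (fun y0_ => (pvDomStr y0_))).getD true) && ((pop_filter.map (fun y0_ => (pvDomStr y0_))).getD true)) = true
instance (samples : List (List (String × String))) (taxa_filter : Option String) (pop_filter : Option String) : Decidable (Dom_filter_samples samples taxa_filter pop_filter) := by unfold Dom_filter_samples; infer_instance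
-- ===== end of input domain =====

-- B replaces A's hard-coded sequential filter passes by a data-driven pipeline of
-- (key, keep-set) stages and one accumulator loop (objective: alternative).

-- shared helpers (the same Python sub-expressions occur verbatim in both programs)
-- Python truthiness of an Optional[str]: None and "" are falsy
def pvTruthy (o : Option String) : Bool :=
  match o with
  | none => false
  | some s => !(s == "")

-- {t.strip() for t in spec.replace(';', ',').split(',') if t.strip()}
def pvKeepSet (spec : String) : PySem.Set String :=
  PySem.Set.ofList
    ((((PySem.Str.split? (PySem.Str.replace spec ";" ",") ",").getD []).filter
        (fun t => !(PySem.Str.strip t == ""))).map PySem.Str.strip)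

-- s[k] made total: the default "" is never consulted inside Pre_ (KeyError excluded there)
def pvGetS (s : List (String × String)) (k : String) : String :=
  ((PySem.Dict.mk s).get? k).getD ""

-- ===== PORT A =====
def filter_samples (samples : List (List (String × String))) (taxa_filter : Option String) (pop_filter : Option String) : List (List (String × String)) :=
  let out := samples
  let out :=
    if pvTruthy taxa_filter then
      let keep := pvKeepSet (taxa_filter.getD "")
      out.filter (fun s => PySem.Set.contains keep (pvGetS s "taxa"))
    else out
  if pvTruthy pop_filter then
    let keep := pvKeepSet (pop_filter.getD "")
    out.filter (fun s => PySem.Set.contains keep (pvGetS s "population"))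
  else out

-- ===== PORT B =====
-- for key, spec in (("taxa", taxa_filter), ("population", pop_filter)): if spec: stages.append(...)
def pvStages (taxa_filter pop_filter : Option String) : List (String × PySem.Set String) :=
  [("taxa", taxa_filter), ("population", pop_filter)].foldl
    (fun stages kp =>
      if pvTruthy kp.2 then stages ++ [(kp.1, pvKeepSet (kp.2.getD ""))] else stages) []

def filter_samples_alt (samples : List (List (String × String))) (taxa_filter : Option String) (pop_filter : Option String) : List (List (String × String)) :=
  let stages := pvStages taxa_filter pop_filter
  if stages.isEmpty then samples
  else
    samples.foldl
      (fun out s =>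
        if stages.all (fun kp => PySem.Set.contains kp.2 (pvGetS s kp.1)) then out ++ [s]
        else out) []

-- ===== PRECONDITION & SPEC =====
-- Pre_ excludes exactly the KeyErrors of A: a truthy taxa_filter needs 'taxa' in every
-- sample, and a truthy pop_filter needs 'population' in every sample that survives the
-- taxa test (or in every sample when there is no taxa filter).
def Pre_filter_samples (samples : List (List (String × String))) (taxa_filter : Option String) (pop_filter : Option String) : Prop :=
  ∀ s ∈ samples,
    (pvTruthy taxa_filter = true → ((PySem.Dict.mk s).get? "taxa").isSome = true) ∧
    ((pvTruthy pop_filter = true ∧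
        (pvTruthy taxa_filter = true →
          PySem.Set.contains (pvKeepSet (taxa_filter.getD "")) (pvGetS s "taxa") = true)) →
      ((PySem.Dict.mk s).get? "population").isSome = true)
instance (samples : List (List (String × String))) (taxa_filter : Option String) (pop_filter : Option String) : Decidable (Pre_filter_samples samples taxa_filter pop_filter) := by unfold Pre_filter_samples; infer_instance

def pvWitness_filter_samples : (List (List (String × String))) × Option String × Option String :=
  ([[("taxa", "a"), ("population", "p")], [("taxa", "b"), ("population", "q")]],
   some "a, b", some "p;q")

def Spec_filter_samples (samples : List (List (String × String))) (taxa_filter : Option String) (pop_filter : Option String) (out : List (List (String × String))) : Prop := out = filter_samples_alt samples taxa_filter pop_filter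
instance (samples : List (List (String × String))) (taxa_filter : Option String) (pop_filter : Option String) (out : List (List (String × String))) : Decidable (Spec_filter_samples samples taxa_filter pop_filter out) := by unfold Spec_filter_samples; infer_instance

-- ===== CLAIM =====
def Claim_equal_filter_samples : Prop := ∀ (samples : List (List (String × String))) (taxa_filter : Option String) (pop_filter : Option String), Dom_filter_samples samples taxa_filter pop_filter → Pre_filter_samples samples taxa_filter pop_filter → Spec_filter_samples samples taxa_filter pop_filter (filter_samples samples taxa_filter pop_filter)

-- ===== LEMMAS AND PROOFS =====

-- ===== VERDICT =====
theorem filter_samples_spec : Claim_equal_filter_samples := by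
  intro samples tf pf _ _
  unfold Spec_filter_samples filter_samples filter_samples_alt pvStages
  rw [List.foldl_cons, List.foldl_cons, List.foldl_nil]
  cases htf : pvTruthy tf <;> cases hpf : pvTruthy pf <;>
    simp only [Bool.false_eq_true, eq_self_iff_true, if_false, if_true,
      List.singleton_append, List.nil_append, List.isEmpty_cons, List.isEmpty_nil,
      PySem.List.foldl_append_if_eq_filter, List.all_cons, List.all_nil,
      Bool.and_true, List.filter_filter]
  exact List.filter_congr (fun a _ => Bool.and_comm _ _)
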